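-- pv_equiv track=rewrite | github.com/swesan123/solarflare-svm-classifier | main.py | generate_feature_combinations
-- ===== SOURCE A (Python) =====
-- def generate_feature_combinations(features):
--     """Generate all non-empty combinations of the given feature set list.
--
--     Parameters
--     ----------
--     features : sequence of str
--
--     Returns
--     -------
--     list[list[str]]
--         List of feature-set combinations (each a list of strings).
--     """
--     combos = [[]]
--
--     for f in features:
--         new_combos = []
--         for c in combos:
--             new_combos.append(c + [f])
--         combos.extend(new_combos)
--
--     combos = [c for c in combos if c]
--     return combos
-- ===== SOURCE B (Python) =====
-- def generate_feature_combinations(features):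
--     fs = list(features)
--     n = len(fs)
--     return [[fs[i] for i in range(n) if (mask >> i) & 1]
--             for mask in range(1, 2 ** n)]
-- ===== Notes on version B (the rewrite author's own statement) =====
-- stated objective: alternative
-- what changed: Replaces the iterative doubling of a combos list (plus a final filter dropping the empty set) by direct bitmask enumeration: each mask in range(1, 2**n) selects features by its bits, reproducing A's order with no filtering pass.
import Mathlib
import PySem

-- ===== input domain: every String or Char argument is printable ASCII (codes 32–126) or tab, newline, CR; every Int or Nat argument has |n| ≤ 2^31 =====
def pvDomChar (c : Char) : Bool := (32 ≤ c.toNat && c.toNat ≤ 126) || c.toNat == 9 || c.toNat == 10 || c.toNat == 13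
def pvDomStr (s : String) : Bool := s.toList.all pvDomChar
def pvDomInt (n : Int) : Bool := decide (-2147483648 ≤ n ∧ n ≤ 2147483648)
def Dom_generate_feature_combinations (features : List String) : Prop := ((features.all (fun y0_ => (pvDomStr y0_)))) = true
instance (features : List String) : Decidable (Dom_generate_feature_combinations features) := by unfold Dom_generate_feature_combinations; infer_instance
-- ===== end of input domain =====

-- B replaces A's iterative doubling + final filter by direct bitmask enumeration (alternative decomposition, same cost).

-- ===== PORT A =====
-- A: combos = [[]]; for f in features: combos.extend([c + [f] for c in combos]); then drop empty lists.
def generate_feature_combinations (features : List String) : List (List String) :=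
  let combos := features.foldl (fun combos f => combos ++ combos.map (fun c => c ++ [f])) [[]]
  combos.filter (fun c => !c.isEmpty)

-- ===== PORT B =====
-- B: [[fs[i] for i in range(n) if (mask >> i) & 1] for mask in range(1, 2**n)]
def generate_feature_combinations_alt (features : List String) : List (List String) :=
  let n := features.length
  (List.range' 1 (2 ^ n - 1)).map (fun mask =>
    (List.range n).filterMap (fun i =>
      if (mask >>> i) % 2 = 1 then some (features.getD i "") else none))

-- ===== PRECONDITION & SPEC =====
def Spec_generate_feature_combinations (features : List String) (out : List (List String)) : Prop := out = generate_feature_combinations_alt features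
instance (features : List String) (out : List (List String)) : Decidable (Spec_generate_feature_combinations features out) := by unfold Spec_generate_feature_combinations; infer_instance

-- ===== CLAIM (what is proved, stated in full; the proofs are below) =====
def Claim_equal_generate_feature_combinations : Prop := ∀ (features : List String), Dom_generate_feature_combinations features → Spec_generate_feature_combinations features (generate_feature_combinations features)

-- ===== LEMMAS AND PROOFS =====

-- the subset of xs selected by the bits of mask (B's inner comprehension)
def pvSubsetOf (xs : List String) (mask : Nat) : List String :=
  (List.range xs.length).filterMap (fun i =>
    if (mask >>> i) % 2 = 1 then some (xs.getD i "") else none)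

theorem pvSubsetOf_zero (xs : List String) : pvSubsetOf xs 0 = [] := by
  simp [pvSubsetOf]

theorem pvShift_low {n i m : Nat} (hi : i < n) :
    ((2 ^ n + m) >>> i) % 2 = (m >>> i) % 2 := by
  simp only [Nat.shiftRight_eq_div_pow]
  have e : 2 ^ i * (2 * 2 ^ (n - i - 1)) = 2 ^ n := by
    rw [← pow_succ', ← pow_add]
    congr 1
    omega
  rw [← e, Nat.mul_add_div (Nat.two_pow_pos i)]
  omega

theorem pvShift_high {n m : Nat} (hm : m < 2 ^ n) : ((2 ^ n + m) >>> n) % 2 = 1 := by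
  simp only [Nat.shiftRight_eq_div_pow]
  rw [Nat.add_comm, Nat.add_div_right _ (Nat.two_pow_pos n), Nat.div_eq_of_lt hm]

theorem pvShift_top {n m : Nat} (hm : m < 2 ^ n) : (m >>> n) % 2 = 0 := by
  simp [Nat.shiftRight_eq_div_pow, Nat.div_eq_of_lt hm]

theorem pvSubsetOf_low (xs : List String) (f : String) {m : Nat} (hm : m < 2 ^ xs.length) :
    pvSubsetOf (xs ++ [f]) m = pvSubsetOf xs m := by
  simp only [pvSubsetOf, List.length_append, List.length_singleton, List.range_succ,
    List.filterMap_append, List.filterMap_cons, List.filterMap_nil, pvShift_top hm]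
  rw [if_neg (by omega : ¬(0 : Nat) = 1)]
  simp only [List.append_nil]
  apply List.filterMap_congr
  intro i hi
  rw [List.mem_range] at hi
  rw [List.getD_append _ _ _ _ hi]

theorem pvSubsetOf_high (xs : List String) (f : String) {m : Nat} (hm : m < 2 ^ xs.length) :
    pvSubsetOf (xs ++ [f]) (2 ^ xs.length + m) = pvSubsetOf xs m ++ [f] := by
  simp only [pvSubsetOf, List.length_append, List.length_singleton, List.range_succ,
    List.filterMap_append, List.filterMap_cons, List.filterMap_nil, pvShift_high hm]
  simp only [if_true]
  congr 1
  · apply List.filterMap_congr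
    intro i hi
    rw [List.mem_range] at hi
    rw [pvShift_low hi, List.getD_append _ _ _ _ hi]
  · simp

-- A's doubling loop computes exactly the bitmask enumeration over range (2^n)
theorem pvLoop_eq (xs : List String) :
    xs.foldl (fun combos f => combos ++ combos.map (fun c => c ++ [f])) [[]] =
      (List.range (2 ^ xs.length)).map (pvSubsetOf xs) := by
  induction xs using List.reverseRecOn with
  | nil => simp [pvSubsetOf_zero]
  | append_singleton xs f ih =>
    rw [List.foldl_append, List.foldl_cons, List.foldl_nil, ih]
    have h2 : 2 ^ (xs ++ [f]).length = 2 ^ xs.length + 2 ^ xs.length := by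
      simp [pow_succ]; ring
    rw [h2, List.range_add, List.map_append]
    simp only [List.map_map]
    congr 1
    · apply List.map_congr_left
      intro m hm
      exact (pvSubsetOf_low xs f (List.mem_range.mp hm)).symm
    · apply List.map_congr_left
      intro m hm
      simp only [Function.comp_apply]
      exact (pvSubsetOf_high xs f (List.mem_range.mp hm)).symm

-- any mask with all low n bits clear and mask < 2^n is zero
theorem pvMask_zero : ∀ (n mask : Nat), mask < 2 ^ n →
    (∀ i < n, (mask >>> i) % 2 = 0) → mask = 0 := by
  intro n
  induction n with
  | zero => intro mask hm _; simpa using hm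
  | succ n ih =>
    intro mask hm hbits
    have h0 : mask % 2 = 0 := by simpa using hbits 0 (Nat.succ_pos n)
    have h2 : mask / 2 < 2 ^ n := by
      rw [pow_succ] at hm; omega
    have : mask / 2 = 0 := by
      apply ih (mask / 2) h2
      intro i hi
      have := hbits (i + 1) (by omega)
      simpa [Nat.shiftRight_eq_div_pow, pow_succ', Nat.div_div_eq_div_mul] using this
    omega

theorem pvSubsetOf_ne_nil (xs : List String) {m : Nat} (h1 : 1 ≤ m) (h2 : m < 2 ^ xs.length) :
    pvSubsetOf xs m ≠ [] := by
  intro hnil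
  rw [pvSubsetOf, List.filterMap_eq_nil_iff] at hnil
  have hb : ∀ i < xs.length, (m >>> i) % 2 = 0 := by
    intro i hi
    have := hnil i (List.mem_range.mpr hi)
    by_cases hc : (m >>> i) % 2 = 1
    · simp [hc] at this
    · omega
  have := pvMask_zero xs.length m h2 hb
  omega

-- ===== VERDICT (by name: the statement is the Claim_ definition above) =====
theorem generate_feature_combinations_spec : Claim_equal_generate_feature_combinations := by
  intro features _
  unfold Spec_generate_feature_combinations generate_feature_combinations
    generate_feature_combinations_alt
  rw [pvLoop_eq]
  show (List.map (pvSubsetOf features) (List.range (2 ^ features.length))).filter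
      (fun c => !c.isEmpty) =
    (List.range' 1 (2 ^ features.length - 1)).map (pvSubsetOf features)
  obtain ⟨k, hk⟩ : ∃ k, 2 ^ features.length = k + 1 :=
    ⟨2 ^ features.length - 1, by have := Nat.one_le_two_pow (n := features.length); omega⟩
  rw [hk, Nat.add_sub_cancel, List.range_eq_range', List.range'_succ, List.map_cons,
    List.filter_cons]
  simp only [pvSubsetOf_zero, List.isEmpty_nil, Bool.not_true, Bool.false_eq_true, if_false]
  apply List.filter_eq_self.mpr
  intro c hc
  obtain ⟨m, hm, rfl⟩ := List.mem_map.mp hc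
  have hmr := List.mem_range'_1.mp hm
  have := pvSubsetOf_ne_nil features hmr.1 (by omega)
  simpa [List.isEmpty_iff]
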